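-- pv_equiv track=rewrite | github.com/wsu-tss/student_pathway_project | studentpathway/dataprocessing/data_sorting.py | get_student_program
-- ===== SOURCE A (Python) =====
-- def get_student_program(student_units, program_units, skip_program=["Common"]):
--     """Takes a dictionary of program units with keys are program and
--     the list of units in the program as the key.
--
--     :param student_units: List of all the units taken by a student.
--     :param program_units: dictionary of program mapped with list of units in the program.
--     :param skip_program: List of program to be skipped. (Default=``["Common"]``)
--
--     :return: The program of in which the student is enrolled.
--
--     >>> import studentpathway as sp
--     >>> program_units = sp.sort_units_program("units_data/engineering_data/engineering_units.csv")
--     >>> student_units = [300480, 300035, 300487, 200238, 300021, 300761, 300762, 300763, 300764]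
--     >>> student_program = sp.get_student_program(student_units, program_units)
--     """
--     program_rank = dict()
--
--     # converts the list of units into set
--     student_units = set(student_units)
--
--     # Identifying the non common units i.e. the commmon units in the first year
--     maintain_units = set()
--
--     # Assigning the units to maintain
--     maintain_units = set(student_units)
--
--     # Checks if the skip program is an empty list
--     if skip_program:
--         # updating the set of units that are not in skip program
--         for program in skip_program:
--             maintain_units.difference_update(
--                 list(student_units.intersection(set(program_units[program])))
--             )
--
--     # Ranking the program based upon the occurence of the units in the student data
--     for program in program_units:
--         program_rank[program] = len(
--             list(set(program_units[program]).intersection(maintain_units))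
--         )
--
--     # Finding the maximum number of units taken by the student from a program
--     student_program = max(program_rank, key=program_rank.get)
--
--     return student_program
-- ===== SOURCE B (Python) =====
-- def get_student_program(student_units, program_units, skip_program=["Common"]):
--     # Drop the units of every skipped program from the student's unit set
--     # (a missing skip program raises KeyError, as in the original).
--     maintained = set(student_units)
--     for program in skip_program:
--         maintained -= set(program_units[program])
--
--     # Inverted index: unit -> list of programs containing it (program order).
--     index = {}
--     for program, units in program_units.items():
--         for u in set(units):
--             index.setdefault(u, []).append(program)
--
--     # Seed every program with 0 in insertion order, then one pass over the
--     # maintained units, charging each unit to every program that owns it.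
--     program_rank = {program: 0 for program in program_units}
--     for u in maintained:
--         for program in index.get(u, []):
--             program_rank[program] += 1
--
--     # First maximum in insertion order; empty dict raises ValueError as before.
--     return max(program_rank, key=program_rank.get)
-- ===== Notes on version B (the rewrite author's own statement) =====
-- stated objective: alternative
-- what changed: B replaces A's per-program set intersections with an inverted index built once from unit to owning programs: ranks are produced by one pass over the maintained units incrementing the counters of the programs that own each unit, after pre-seeding every program key with 0 in insertion order.
import Mathlib
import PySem

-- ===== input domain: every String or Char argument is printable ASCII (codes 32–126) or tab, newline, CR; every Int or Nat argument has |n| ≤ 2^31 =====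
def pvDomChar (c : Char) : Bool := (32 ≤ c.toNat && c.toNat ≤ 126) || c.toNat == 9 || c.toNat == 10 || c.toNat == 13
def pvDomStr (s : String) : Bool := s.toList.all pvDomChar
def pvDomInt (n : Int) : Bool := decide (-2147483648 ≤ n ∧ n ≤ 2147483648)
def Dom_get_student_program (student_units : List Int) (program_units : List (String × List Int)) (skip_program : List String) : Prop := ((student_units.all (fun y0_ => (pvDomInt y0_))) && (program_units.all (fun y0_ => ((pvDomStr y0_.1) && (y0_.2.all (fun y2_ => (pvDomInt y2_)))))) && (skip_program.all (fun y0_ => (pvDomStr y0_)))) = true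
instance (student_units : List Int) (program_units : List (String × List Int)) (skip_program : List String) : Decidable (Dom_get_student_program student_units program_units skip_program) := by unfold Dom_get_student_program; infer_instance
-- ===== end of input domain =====

-- B ranks programs through an inverted index (unit -> owning programs) built once, pre-seeding
-- every program counter with 0 and charging each maintained unit to its owners (objective: alternative).

-- ===== PORT A =====
def get_student_program (student_units : List Int) (program_units : List (String × List Int)) (skip_program : List String) : String :=
  let d := PySem.Dict.ofList program_units
  -- student_units = set(student_units); maintain_units = set(student_units)
  let studentSet : PySem.Set Int := PySem.Set.ofList student_units
  -- for program in skip_program: maintain_units.difference_update(list(student_units & set(program_units[program])))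
  -- (the 'if skip_program:' guard only guards this loop, which does nothing on an empty list)
  let maintainUnits : PySem.Set Int :=
    skip_program.foldl
      (fun m program => PySem.Set.diff m (PySem.Set.inter studentSet (PySem.Set.ofList (d.getD program []))))
      studentSet
  -- for program in program_units: program_rank[program] = len(list(set(program_units[program]) & maintain_units))
  let programRank : PySem.Dict String Int :=
    d.keys.foldl
      (fun r program =>
        r.insert program (PySem.Set.len (PySem.Set.inter (PySem.Set.ofList (d.getD program [])) maintainUnits)))
      PySem.Dict.empty
  -- max(program_rank, key=program_rank.get); Pre_ excludes the empty dict (ValueError)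
  (PySem.List.max? programRank.keys (fun program => programRank.getD program 0)).getD ""

-- ===== PORT B =====
def get_student_program_alt (student_units : List Int) (program_units : List (String × List Int)) (skip_program : List String) : String :=
  let d := PySem.Dict.ofList program_units
  -- maintained = set(student_units); maintained -= set(program_units[program]) per skip program
  let maintained : PySem.Set Int :=
    skip_program.foldl (fun m program => PySem.Set.diff m (PySem.Set.ofList (d.getD program []))) (PySem.Set.ofList student_units)
  -- inverted index: for program, units in items: for u in set(units): index.setdefault(u, []).append(program)
  -- (setdefault+append ported as insert of getD [] ++ [program]; insert overwrites in place, so this is exact)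
  let index : PySem.Dict Int (List String) :=
    d.items.foldl
      (fun idx pr =>
        (PySem.Set.ofList pr.2).foldl (fun idx u => idx.insert u (idx.getD u [] ++ [pr.1])) idx)
      PySem.Dict.empty
  -- program_rank = {program: 0 for program in program_units}
  let rank0 : PySem.Dict String Int := d.keys.foldl (fun r program => r.insert program 0) PySem.Dict.empty
  -- for u in maintained: for program in index.get(u, []): program_rank[program] += 1
  -- (the counts do not depend on the set's iteration order, so iterating the Set's list is exact)
  let rank : PySem.Dict String Int :=
    maintained.foldl
      (fun r u => (index.getD u []).foldl (fun r program => r.insert program (r.getD program 0 + 1)) r)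
      rank0
  -- max(program_rank, key=program_rank.get); Pre_ excludes the empty dict (ValueError)
  (PySem.List.max? rank.keys (fun program => rank.getD program 0)).getD ""

-- ===== PRECONDITION & SPEC =====
-- Pre_ excludes exactly the inputs where A raises: an empty program dict (ValueError from max)
-- and a skip program that is not a key of program_units (KeyError).
def Pre_get_student_program (student_units : List Int) (program_units : List (String × List Int)) (skip_program : List String) : Prop :=
  program_units ≠ [] ∧ ∀ p ∈ skip_program, p ∈ program_units.map Prod.fst
instance (student_units : List Int) (program_units : List (String × List Int)) (skip_program : List String) : Decidable (Pre_get_student_program student_units program_units skip_program) := by unfold Pre_get_student_program; infer_instance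

def pvWitness_get_student_program : List Int × (List (String × List Int)) × List String :=
  ([1, 2, 3], [("Common", [1]), ("Eng", [2, 3])], ["Common"])

def Spec_get_student_program (student_units : List Int) (program_units : List (String × List Int)) (skip_program : List String) (out : String) : Prop := out = get_student_program_alt student_units program_units skip_program
instance (student_units : List Int) (program_units : List (String × List Int)) (skip_program : List String) (out : String) : Decidable (Spec_get_student_program student_units program_units skip_program out) := by unfold Spec_get_student_program; infer_instance

-- ===== CLAIM (what is proved, stated in full; the proofs are below) =====
def Claim_equal_get_student_program : Prop := ∀ (student_units : List Int) (program_units : List (String × List Int)) (skip_program : List String), Dom_get_student_program student_units program_units skip_program → Pre_get_student_program student_units program_units skip_program → Spec_get_student_program student_units program_units skip_program (get_student_program student_units program_units skip_program)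

-- ===== LEMMAS AND PROOFS =====

theorem pv_filter_mem_comm {α : Type} [BEq α] [LawfulBEq α] [DecidableEq α]
    (X Y : List α) (hX : X.Nodup) (hY : Y.Nodup) :
    (X.filter (fun a => Y.contains a)).length = (Y.filter (fun a => X.contains a)).length := by
  have h1 : ∀ (L M : List α), L.filter (fun a => M.contains a) = L.filter (fun a => decide (a ∈ M)) := by
    intro L M; apply List.filter_congr; intro a _; simp
  rw [h1 X Y, h1 Y X]
  rw [← List.toFinset_card_of_nodup (hX.filter _), ← List.toFinset_card_of_nodup (hY.filter _)]
  rw [List.toFinset_filter, List.toFinset_filter]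
  have h2 : ∀ (L M : List α), {x ∈ L.toFinset | (decide (x ∈ M) : Bool) = true} = L.toFinset ∩ M.toFinset := by
    intro L M; ext x; simp
  rw [h2 X Y, h2 Y X, Finset.inter_comm]

-- both skip loops are the same filter over the student set
theorem pv_foldl_diff (g : String → List Int) (sp : List String) :
    ∀ (m : List Int),
      sp.foldl (fun m p => PySem.Set.diff m (g p)) m =
        m.filter (fun u => decide (∀ p ∈ sp, u ∉ g p)) := by
  induction sp with
  | nil => intro m; simp
  | cons p t ih =>
    intro m
    rw [List.foldl_cons, ih]
    show (PySem.Set.diff m (g p)).filter _ = _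
    unfold PySem.Set.diff
    rw [List.filter_filter]
    apply List.filter_congr
    intro u _
    rw [Bool.eq_iff_iff]
    simp only [PySem.Set.contains, Bool.and_eq_true, Bool.not_eq_true', List.contains_eq_mem,
      List.mem_cons, decide_eq_true_eq, decide_eq_false_iff_not]
    constructor
    · rintro ⟨h1, h2⟩ q hq
      rcases hq with rfl | hq
      · exact h2
      · exact h1 q hq
    · intro h
      exact ⟨fun q hq => h q (Or.inr hq), h p (Or.inl rfl)⟩

-- inner index loop: one program appended to each of its (distinct) units
theorem pv_index_inner (p : String) (us : List Int) (hnd : us.Nodup) :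
    ∀ (idx : PySem.Dict Int (List String)) (u : Int),
      (us.foldl (fun idx x => idx.insert x (idx.getD x [] ++ [p])) idx).getD u [] =
        idx.getD u [] ++ (if u ∈ us then [p] else []) := by
  induction us with
  | nil => intro idx u; simp
  | cons x t ih =>
    intro idx u
    rw [List.foldl_cons, ih (List.Nodup.of_cons hnd)]
    rw [PySem.Dict.getD_insert]
    by_cases hux : u = x
    · subst hux
      have hnt : u ∉ t := (List.nodup_cons.mp hnd).1
      simp [hnt]
    · simp [hux]

-- the whole index: index[u] = programs (in order) whose unit set contains u
theorem pv_index_getD (ps : List (String × List Int)) :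
    ∀ (idx : PySem.Dict Int (List String)) (u : Int),
      (ps.foldl
        (fun idx pr => (PySem.Set.ofList pr.2).foldl (fun idx x => idx.insert x (idx.getD x [] ++ [pr.1])) idx)
        idx).getD u [] =
        idx.getD u [] ++ (ps.filter (fun pr => decide (u ∈ PySem.Set.ofList pr.2))).map Prod.fst := by
  induction ps with
  | nil => intro idx u; simp
  | cons pr t ih =>
    intro idx u
    rw [List.foldl_cons, ih, pv_index_inner pr.1 (PySem.Set.ofList pr.2) (PySem.Set.nodup_ofList pr.2)]
    simp only [List.filter_cons]
    by_cases hu : u ∈ PySem.Set.ofList pr.2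
    · rw [PySem.Set.mem_ofList] at hu
      simp [hu]
    · rw [PySem.Set.mem_ofList] at hu
      simp [hu]

-- counting a key's occurrences in the index entry, when keys are unique
theorem pv_countP_unique (u : Int) (p : String) :
    ∀ (ps : List (String × List Int)), (ps.map Prod.fst).Nodup →
      ∀ L, (p, L) ∈ ps →
        ps.countP (fun pr => (pr.1 == p) && decide (u ∈ PySem.Set.ofList pr.2)) =
          (if u ∈ PySem.Set.ofList L then 1 else 0) := by
  intro ps
  induction ps with
  | nil => intro _ L hL; exact absurd hL (List.not_mem_nil)
  | cons a t ih =>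
    intro hnd L hL
    have hnd2 : a.1 ∉ t.map Prod.fst ∧ (t.map Prod.fst).Nodup := by
      rw [List.map_cons] at hnd; exact List.nodup_cons.mp hnd
    rw [List.countP_cons]
    rcases List.mem_cons.mp hL with rfl | hLt
    · have hzero : t.countP (fun pr => (pr.1 == p) && decide (u ∈ PySem.Set.ofList pr.2)) = 0 := by
        apply List.countP_eq_zero.mpr
        intro pr hpr
        have hne : pr.1 ≠ p := by
          intro h
          have hm : pr.1 ∈ t.map Prod.fst := List.mem_map_of_mem hpr
          rw [h] at hm
          exact hnd2.1 hm
        simp [hne]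
      rw [hzero]
      by_cases hu : u ∈ PySem.Set.ofList L <;> simp [hu]
    · have hne : a.1 ≠ p := by
        intro h
        exact hnd2.1 (h ▸ (List.mem_map_of_mem hLt : (p, L).1 ∈ t.map Prod.fst))
      rw [ih hnd2.2 L hLt]
      simp [hne]

-- the counting loop over the maintained units, per program
theorem pv_rank_getD (idxget : Int → List String) :
    ∀ (m : List Int) (r : PySem.Dict String Int) (p : String),
      (m.foldl (fun r u => (idxget u).foldl (fun r q => r.insert q (r.getD q 0 + 1)) r) r).getD p 0 =
        r.getD p 0 + (m.map (fun u => ((idxget u).count p : Int))).sum := by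
  intro m
  induction m with
  | nil => intro r p; simp
  | cons u t ih =>
    intro r p
    rw [List.foldl_cons, ih, PySem.Dict.getD_foldl_insert_add_one]
    simp [add_assoc]

-- the counting loop never touches the key list
theorem pv_rank_keys (idxget : Int → List String) (K : List String) :
    ∀ (m : List Int) (r : PySem.Dict String Int), r.keys = K → (∀ u, ∀ q ∈ idxget u, q ∈ K) →
      (m.foldl (fun r u => (idxget u).foldl (fun r q => r.insert q (r.getD q 0 + 1)) r) r).keys = K := by
  intro m
  induction m with
  | nil => intro r hk _; exact hk
  | cons u t ih =>
    intro r hk hsub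
    rw [List.foldl_cons]
    apply ih _ _ hsub
    rw [PySem.Dict.keys_foldl_insert, PySem.Set.update_eq_append_filter, hk]
    rw [List.filter_eq_nil_iff.mpr ?_]
    · simp
    · intro y hy
      have hyK : y ∈ K := hsub u y ((PySem.Set.mem_ofList _ _).mp hy)
      simp [PySem.Set.contains, hyK]

-- A's max(key=...) as a fold with a named step function
def pvStepA (f : String → Int) (acc : Option String) (x : String) : Option String :=
  match acc with
  | none => some x
  | some mm => if f mm < f x then some x else some mm

theorem pv_max_eq_foldl (f : String → Int) (ks : List String) :
    PySem.List.max? ks f = ks.foldl (pvStepA f) none := by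
  unfold PySem.List.max?
  congr 1
  funext acc x
  cases acc <;> rfl

-- max? only looks at the key function on members
theorem pv_max_congr_aux (f g : String → Int) :
    ∀ (ks : List String) (m : String), f m = g m → (∀ x ∈ ks, f x = g x) →
      ks.foldl (pvStepA f) (some m) = ks.foldl (pvStepA g) (some m) := by
  intro ks
  induction ks with
  | nil => intro m _ _; rfl
  | cons x t ih =>
    intro m hm hall
    have hx : f x = g x := hall x (List.mem_cons_self ..)
    rw [List.foldl_cons, List.foldl_cons]
    have hstep : pvStepA f (some m) x = pvStepA g (some m) x := by
      show (if f m < f x then some x else some m) = (if g m < g x then some x else some m)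
      rw [hm, hx]
    rw [hstep]
    show List.foldl (pvStepA f) (pvStepA g (some m) x) t = _
    have hrest := fun y hy => hall y (List.mem_cons_of_mem _ hy)
    unfold pvStepA
    by_cases h : g m < g x
    · simp only [if_pos h]; exact ih x hx hrest
    · simp only [if_neg h]; exact ih m hm hrest

theorem pv_max_congr (f g : String → Int) (ks : List String) (hall : ∀ x ∈ ks, f x = g x) :
    PySem.List.max? ks f = PySem.List.max? ks g := by
  rw [pv_max_eq_foldl, pv_max_eq_foldl]
  cases ks with
  | nil => rfl
  | cons k t =>
    rw [List.foldl_cons, List.foldl_cons]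
    show List.foldl (pvStepA f) (some k) t = List.foldl (pvStepA g) (some k) t
    exact pv_max_congr_aux f g t k (hall k (List.mem_cons_self ..)) (fun y hy => hall y (List.mem_cons_of_mem _ hy))

-- ===== VERDICT (by name: the statement is the Claim_ definition above) =====
theorem get_student_program_spec : Claim_equal_get_student_program := by
  intro su pu sp _ hpre
  unfold Spec_get_student_program get_student_program get_student_program_alt
  simp only []
  -- the two maintained-unit computations coincide
  have hM : List.foldl (fun m program => PySem.Set.diff m (PySem.Set.inter (PySem.Set.ofList su) (PySem.Set.ofList ((PySem.Dict.ofList pu).getD program [])))) (PySem.Set.ofList su) sp = List.foldl (fun m program => PySem.Set.diff m (PySem.Set.ofList ((PySem.Dict.ofList pu).getD program []))) (PySem.Set.ofList su) sp := by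
    rw [pv_foldl_diff (fun p => PySem.Set.inter (PySem.Set.ofList su) (PySem.Set.ofList ((PySem.Dict.ofList pu).getD p []))) sp,
        pv_foldl_diff (fun p => PySem.Set.ofList ((PySem.Dict.ofList pu).getD p [])) sp]
    apply List.filter_congr
    intro u hu
    have huS : u ∈ PySem.Set.ofList su := hu
    simp only [decide_eq_decide]
    constructor
    · intro h p hp hc
      exact h p hp ((PySem.Set.mem_inter _ _ _).mpr ⟨huS, hc⟩)
    · intro h p hp hc
      exact h p hp ((PySem.Set.mem_inter _ _ _).mp hc).2
  rw [hM]
  set M := List.foldl (fun m program => PySem.Set.diff m (PySem.Set.ofList ((PySem.Dict.ofList pu).getD program []))) (PySem.Set.ofList su) sp with hMdef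
  have hMnodup : M.Nodup := by
    rw [hMdef, pv_foldl_diff (fun p => PySem.Set.ofList ((PySem.Dict.ofList pu).getD p [])) sp]
    exact (PySem.Set.nodup_ofList su).filter _
  have hnodupK := PySem.Dict.nodup_keys_ofList (ps := pu)
  -- A's rank dict: keys and per-key values
  set rankA := List.foldl (fun r program => r.insert program (PySem.Set.len (PySem.Set.inter (PySem.Set.ofList ((PySem.Dict.ofList pu).getD program [])) M))) PySem.Dict.empty (PySem.Dict.ofList pu).keys with hrankAdef
  have hitemsA : rankA.items = List.map (fun p => (p, PySem.Set.len (PySem.Set.inter (PySem.Set.ofList ((PySem.Dict.ofList pu).getD p [])) M))) (PySem.Dict.ofList pu).keys := by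
    have h := PySem.Dict.items_foldl_insert_fresh (PySem.Dict.ofList pu).keys (fun p => p) (fun p => PySem.Set.len (PySem.Set.inter (PySem.Set.ofList ((PySem.Dict.ofList pu).getD p [])) M)) PySem.Dict.empty (fun a _ => by simp [PySem.Dict.contains, PySem.Dict.empty]) (by simpa using hnodupK)
    simpa using h
  have hkeysA : rankA.keys = (PySem.Dict.ofList pu).keys := by
    rw [PySem.Dict.keys, hitemsA, List.map_map]
    exact List.map_id' _
  have hgetDA : ∀ p ∈ (PySem.Dict.ofList pu).keys, rankA.getD p 0 = PySem.Set.len (PySem.Set.inter (PySem.Set.ofList ((PySem.Dict.ofList pu).getD p [])) M) := by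
    intro p hp
    exact PySem.Dict.getD_of_mem_items rankA (by rw [hitemsA]; exact List.mem_map_of_mem hp) (by rw [hkeysA]; exact hnodupK) 0
  -- B's index: entry for u lists the programs whose unit set contains u
  set idx := List.foldl (fun idx pr => List.foldl (fun idx u => idx.insert u (idx.getD u [] ++ [pr.1])) idx (PySem.Set.ofList pr.2)) PySem.Dict.empty (PySem.Dict.ofList pu).items with hidxdef
  have hidx : ∀ u, idx.getD u [] = (List.filter (fun pr => decide (u ∈ PySem.Set.ofList pr.2)) (PySem.Dict.ofList pu).items).map Prod.fst := by
    intro u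
    rw [hidxdef, pv_index_getD]
    simp
  have hidxsub : ∀ u, ∀ q ∈ idx.getD u [], q ∈ (PySem.Dict.ofList pu).keys := by
    intro u q hq
    rw [hidx u] at hq
    obtain ⟨pr, hpr, rfl⟩ := List.mem_map.mp hq
    exact PySem.Dict.mem_keys_of_mem_items _ (List.mem_filter.mp hpr).1
  -- B's seed dict
  set rank0 := List.foldl (fun r program => r.insert program (0 : Int)) PySem.Dict.empty (PySem.Dict.ofList pu).keys with hrank0def
  have hitems0 : rank0.items = List.map (fun p => (p, (0 : Int))) (PySem.Dict.ofList pu).keys := by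
    have h := PySem.Dict.items_foldl_insert_fresh (PySem.Dict.ofList pu).keys (fun p => p) (fun _ => (0 : Int)) PySem.Dict.empty (fun a _ => by simp [PySem.Dict.contains, PySem.Dict.empty]) (by simpa using hnodupK)
    simpa using h
  have hkeys0 : rank0.keys = (PySem.Dict.ofList pu).keys := by
    rw [PySem.Dict.keys, hitems0, List.map_map]
    exact List.map_id' _
  have hgetD0 : ∀ p ∈ (PySem.Dict.ofList pu).keys, rank0.getD p 0 = 0 := by
    intro p hp
    exact PySem.Dict.getD_of_mem_items rank0 (by rw [hitems0]; exact List.mem_map_of_mem hp) (by rw [hkeys0]; exact hnodupK) 0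
  -- B's rank dict: keys and per-key values
  set rankB := List.foldl (fun r u => List.foldl (fun r program => r.insert program (r.getD program 0 + 1)) r (idx.getD u [])) rank0 M with hrankBdef
  have hkeysB : rankB.keys = (PySem.Dict.ofList pu).keys := by
    rw [hrankBdef]
    exact pv_rank_keys (fun u => idx.getD u []) (PySem.Dict.ofList pu).keys M rank0 hkeys0 hidxsub
  have hcount : ∀ p ∈ (PySem.Dict.ofList pu).keys, ∀ u, ((idx.getD u []).count p : Int) = (if u ∈ PySem.Set.ofList ((PySem.Dict.ofList pu).getD p []) then (1 : Int) else 0) := by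
    intro p hp u
    -- the (unique) item of p
    obtain ⟨pr, hpr, hfst⟩ := List.mem_map.mp (show p ∈ (PySem.Dict.ofList pu).items.map Prod.fst from hp)
    obtain ⟨L, rfl⟩ : ∃ L, pr = (p, L) := ⟨pr.2, by rw [← hfst]⟩
    have hgL : (PySem.Dict.ofList pu).getD p [] = L := PySem.Dict.getD_of_mem_items _ hpr hnodupK []
    rw [hidx u, hgL]
    have h1 : ((List.filter (fun pr => decide (u ∈ PySem.Set.ofList pr.2)) (PySem.Dict.ofList pu).items).map Prod.fst).count p = List.countP (fun pr => (pr.1 == p) && decide (u ∈ PySem.Set.ofList pr.2)) (PySem.Dict.ofList pu).items := by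
      rw [List.count_eq_countP, List.countP_map, List.countP_filter]
      exact List.countP_congr (fun a _ => by simp [Function.comp])
    rw [h1, pv_countP_unique u p (PySem.Dict.ofList pu).items hnodupK L hpr]
    by_cases hu : u ∈ PySem.Set.ofList L <;> simp [hu]
  have hgetDB : ∀ p ∈ (PySem.Dict.ofList pu).keys, rankB.getD p 0 = ((M.countP (fun u => decide (u ∈ PySem.Set.ofList ((PySem.Dict.ofList pu).getD p [])))) : Int) := by
    intro p hp
    rw [hrankBdef, pv_rank_getD (fun u => idx.getD u []) M rank0 p, hgetD0 p hp, zero_add]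
    have hmap : M.map (fun u => (((idx.getD u []).count p : Nat) : Int)) = M.map (fun u => if decide (u ∈ PySem.Set.ofList ((PySem.Dict.ofList pu).getD p [])) = true then (1 : Int) else 0) := by
      apply List.map_congr_left
      intro u _
      rw [hcount p hp u]
      by_cases hu : u ∈ PySem.Set.ofList ((PySem.Dict.ofList pu).getD p []) <;> simp [hu]
    rw [hmap, PySem.List.sum_map_ite_one_zero]
  -- A's and B's per-key values agree
  have hvals : ∀ p ∈ (PySem.Dict.ofList pu).keys, rankA.getD p 0 = rankB.getD p 0 := by
    intro p hp
    rw [hgetDA p hp, hgetDB p hp]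
    show ((List.filter (fun x => PySem.Set.contains M x) (PySem.Set.ofList ((PySem.Dict.ofList pu).getD p []))).length : Int) = _
    have hcomm := pv_filter_mem_comm (PySem.Set.ofList ((PySem.Dict.ofList pu).getD p [])) M (PySem.Set.nodup_ofList _) hMnodup
    simp only [PySem.Set.contains] at hcomm ⊢
    rw [hcomm]
    congr 1
    rw [List.countP_eq_length_filter]
    congr 1
    apply List.filter_congr
    intro u _
    simp
  rw [hkeysA, hkeysB, pv_max_congr (fun p => rankA.getD p 0) (fun p => rankB.getD p 0) (PySem.Dict.ofList pu).keys hvals]
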